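-- pv_equiv track=rewrite | github.com/Ankush12852/fonus | extract_questions.py | clean_pdf_text
-- ===== SOURCE A (Python) =====
-- _WATERMARK_KEYWORDS = ["www.", "amequestionpaper", "Visit our website", "download", "©", "copyright"]
--
-- def clean_pdf_text(text: str) -> str:
--     """
--     Remove watermark lines, very short lines, and repeated blank lines
--     from PyMuPDF-extracted text before sending to LLM.
--     """
--     lines = text.splitlines()
--     cleaned = []
--     prev_blank = False
--     for line in lines:
--         stripped = line.strip()
--         # Drop lines containing watermark keywords (case-insensitive for some)
--         if any(kw.lower() in stripped.lower() for kw in _WATERMARK_KEYWORDS):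
--             continue
--         # Drop lines shorter than 4 chars (noise)
--         if len(stripped) < 4:
--             # But collapse consecutive blank lines to one
--             if stripped == "":
--                 if not prev_blank:
--                     cleaned.append("")
--                 prev_blank = True
--             continue
--         prev_blank = False
--         cleaned.append(line)
--     return "\n".join(cleaned)
-- ===== SOURCE B (Python) =====
-- _WATERMARK_KEYWORDS = ["www.", "amequestionpaper", "Visit our website", "download", "©", "copyright"]
--
-- def _keep(line):
--     # Classify one line: None = drop, "" = blank marker, otherwise the content line.
--     s = line.strip()
--     if any(kw.lower() in s.lower() for kw in _WATERMARK_KEYWORDS):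
--         return None
--     if s == "":
--         return ""
--     if len(s) >= 4:
--         return line
--     return None
--
-- def clean_pdf_text(text: str) -> str:
--     # Pass 1: classify every line, dropping noise entirely.
--     kept = [k for k in map(_keep, text.splitlines()) if k is not None]
--     # Pass 2: collapse runs of blank markers by looking at the last emitted line.
--     out = []
--     for x in kept:
--         if x == "" and out and out[-1] == "":
--             continue
--         out.append(x)
--     return "\n".join(out)
-- ===== Notes on version B (the rewrite author's own statement) =====
-- stated objective: alternative
-- what changed: Replaces A's single loop carrying a prev_blank flag with two passes: a classification pass (helper mapping each line to drop/blank-marker/content) followed by a blank-collapsing pass that checks the last emitted line instead of a flag.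
import Mathlib
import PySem

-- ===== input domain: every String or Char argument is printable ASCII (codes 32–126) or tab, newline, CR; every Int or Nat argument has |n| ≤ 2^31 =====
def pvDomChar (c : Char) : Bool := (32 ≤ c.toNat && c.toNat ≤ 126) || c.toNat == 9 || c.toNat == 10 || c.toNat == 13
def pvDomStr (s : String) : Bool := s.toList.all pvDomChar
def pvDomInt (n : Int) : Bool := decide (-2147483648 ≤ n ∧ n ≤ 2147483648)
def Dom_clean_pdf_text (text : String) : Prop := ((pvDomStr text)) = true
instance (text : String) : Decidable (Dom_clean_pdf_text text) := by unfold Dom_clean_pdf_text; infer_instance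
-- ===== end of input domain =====

-- B reorganises A's single flag-carrying loop into two passes: a classification pass
-- (drop / blank marker / content) and a blank-collapsing pass that inspects the last
-- emitted line instead of a boolean flag; objective: alternative decomposition.

def pvKeywords : List String :=
  ["www.", "amequestionpaper", "Visit our website", "download", "©", "copyright"]

-- ===== PORT A =====
def clean_pdf_text (text : String) : String :=
  let lines := PySem.Str.splitlines text
  let res := lines.foldl (fun (st : List String × Bool) line =>
    let cleaned := st.1
    let prev_blank := st.2
    let stripped := PySem.Str.strip line
    if pvKeywords.any (fun kw =>
        PySem.Str.isIn (PySem.Str.lower kw) (PySem.Str.lower stripped)) then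
      (cleaned, prev_blank)
    else if PySem.Str.len stripped < 4 then
      if stripped = "" then
        (if prev_blank then cleaned else cleaned ++ [""], true)
      else
        (cleaned, prev_blank)
    else
      (cleaned ++ [line], false)) ([], false)
  PySem.Str.join "\n" res.1

-- ===== PORT B =====
def pvKeep (line : String) : Option String :=
  let s := PySem.Str.strip line
  if pvKeywords.any (fun kw =>
      PySem.Str.isIn (PySem.Str.lower kw) (PySem.Str.lower s)) then
    none
  else if s = "" then
    some ""
  else if 4 ≤ PySem.Str.len s then
    some line
  else
    none

def clean_pdf_text_alt (text : String) : String :=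
  let kept := (PySem.Str.splitlines text).filterMap pvKeep
  let out := kept.foldl (fun out x =>
    if x = "" ∧ out ≠ [] ∧ PySem.List.pyGet? out (-1) = some "" then out
    else out ++ [x]) []
  PySem.Str.join "\n" out

-- ===== PRECONDITION & SPEC =====
def Spec_clean_pdf_text (text : String) (out : String) : Prop := out = clean_pdf_text_alt text
instance (text : String) (out : String) : Decidable (Spec_clean_pdf_text text out) := by unfold Spec_clean_pdf_text; infer_instance

-- ===== CLAIM (what is proved, stated in full; the proofs are below) =====
def Claim_equal_clean_pdf_text : Prop := ∀ (text : String), Dom_clean_pdf_text text → Spec_clean_pdf_text text (clean_pdf_text text)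

-- ===== LEMMAS AND PROOFS =====

-- The common "collapsed kept-list" both loops produce, with pb = "a blank was just emitted".
def pvG (pb : Bool) : List String → List String
  | [] => []
  | x :: xs => if x = "" then (if pb then pvG true xs else "" :: pvG true xs) else x :: pvG false xs

-- The final value of A's prev_blank flag (needed only to state pvA_loop).
def pvGB (pb : Bool) : List String → Bool
  | [] => pb
  | x :: xs => if x = "" then pvGB true xs else pvGB false xs

lemma pvB_loop (ks acc : List String) :
    ks.foldl (fun out x =>
      if x = "" ∧ out ≠ [] ∧ PySem.List.pyGet? out (-1) = some "" then out
      else out ++ [x]) acc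
    = acc ++ pvG (acc.getLast? == some "") ks := by
  induction ks generalizing acc with
  | nil => simp [pvG]
  | cons x xs ih =>
    simp only [List.foldl_cons, pvG]
    by_cases hx : x = ""
    · subst hx
      by_cases hpb : acc.getLast? = some ""
      · have hne : acc ≠ [] := by intro h; subst h; simp at hpb
        rw [if_pos ⟨rfl, hne, by rw [PySem.List.pyGet?_neg_one]; exact hpb⟩, ih]
        simp [hpb]
      · have hc : ¬("" = "" ∧ acc ≠ [] ∧ PySem.List.pyGet? acc (-1) = some "") := by
          rw [PySem.List.pyGet?_neg_one]; intro h; exact hpb h.2.2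
        rw [if_neg hc, ih]
        have h1 : ((acc ++ [""]).getLast? == some "") = true := by simp
        have h2 : (acc.getLast? == some "") = false := by
          simpa using hpb
        rw [h1, h2]
        simp
    · have hc : ¬(x = "" ∧ acc ≠ [] ∧ PySem.List.pyGet? acc (-1) = some "") := by
        intro h; exact hx h.1
      rw [if_neg hc, ih]
      have h1 : ((acc ++ [x]).getLast? == some "") = false := by
        simp [hx]
      rw [h1]
      simp [hx]

lemma pvA_loop (lines acc : List String) (pb : Bool) :
    lines.foldl (fun (st : List String × Bool) line =>
      let cleaned := st.1
      let prev_blank := st.2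
      let stripped := PySem.Str.strip line
      if pvKeywords.any (fun kw =>
          PySem.Str.isIn (PySem.Str.lower kw) (PySem.Str.lower stripped)) then
        (cleaned, prev_blank)
      else if PySem.Str.len stripped < 4 then
        if stripped = "" then
          (if prev_blank then cleaned else cleaned ++ [""], true)
        else
          (cleaned, prev_blank)
      else
        (cleaned ++ [line], false)) (acc, pb)
    = (acc ++ pvG pb (lines.filterMap pvKeep),
       pvGB pb (lines.filterMap pvKeep)) := by
  induction lines generalizing acc pb with
  | nil => simp [pvG, pvGB]
  | cons line rest ih =>
    simp only [List.foldl_cons]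
    by_cases hw : (pvKeywords.any (fun kw =>
        PySem.Str.isIn (PySem.Str.lower kw) (PySem.Str.lower (PySem.Str.strip line)))) = true
    · have hk : pvKeep line = none := by
        simp only [pvKeep]; rw [if_pos hw]
      simp only [List.filterMap_cons, hk, if_pos hw]
      exact ih acc pb
    · by_cases hb : PySem.Str.strip line = ""
      · have hk : pvKeep line = some "" := by
          simp only [pvKeep]; rw [if_neg hw, if_pos hb]
        have hlen : PySem.Str.len (PySem.Str.strip line) < 4 := by rw [hb]; decide
        simp only [List.filterMap_cons, hk, if_neg hw, if_pos hlen, if_pos hb]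
        cases pb with
        | true =>
          rw [if_pos rfl, ih acc true]
          simp [pvG, pvGB]
        | false =>
          rw [if_neg (by simp), ih (acc ++ [""]) true]
          simp [pvG, pvGB]
      · by_cases hlen : PySem.Str.len (PySem.Str.strip line) < 4
        · have h4 : ¬ (4 : Int) ≤ PySem.Str.len (PySem.Str.strip line) := by omega
          have hk : pvKeep line = none := by
            simp only [pvKeep]; rw [if_neg hw, if_neg hb, if_neg h4]
          simp only [List.filterMap_cons, hk, if_neg hw, if_pos hlen, if_neg hb]
          exact ih acc pb
        · have h4 : (4 : Int) ≤ PySem.Str.len (PySem.Str.strip line) := by omega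
          have hk : pvKeep line = some line := by
            simp only [pvKeep]; rw [if_neg hw, if_neg hb, if_pos h4]
          have hne : line ≠ "" := by
            intro h; apply hb; rw [h]; decide
          simp only [List.filterMap_cons, hk, if_neg hw, if_neg hlen]
          rw [ih (acc ++ [line]) false]
          simp [pvG, pvGB, hne]

-- ===== VERDICT (by name: the statement is the Claim_ definition above) =====
theorem clean_pdf_text_spec : Claim_equal_clean_pdf_text := by
  intro text _
  unfold Spec_clean_pdf_text clean_pdf_text clean_pdf_text_alt
  dsimp only
  rw [pvA_loop, pvB_loop]
  simp
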